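-- pv_equiv track=rewrite | github.com/Red-Liu199/CAT | cat/shared/coreutils.py | divide_almost_equally
-- ===== SOURCE A (Python) =====
-- import heapq
--
-- def divide_almost_equally(arr_l, arr_idx, num_chunks):
--     sorted_arr = list(zip(arr_l, arr_idx))
--
--     heap = [(0, idx) for idx in range(num_chunks)]
--     heapq.heapify(heap)
--     groups = {i: [] for i in range(num_chunks)}
--
--     for arr_idx in range(len(arr_l)):
--         g_sum, g_idx = heapq.heappop(heap)
--         groups[g_idx].append(sorted_arr[arr_idx][1])
--         g_sum += sorted_arr[arr_idx][0]
--         heapq.heappush(heap, (g_sum, g_idx))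
--
--     return groups.values()
-- ===== SOURCE B (Python) =====
-- def divide_almost_equally(arr_l, arr_idx, num_chunks):
--     sums = [0] * num_chunks
--     groups = [[] for _ in range(num_chunks)]
--     for w, idx in zip(arr_l, arr_idx):
--         g = sums.index(min(sums))
--         groups[g].append(idx)
--         sums[g] += w
--     return groups
-- ===== Notes on version B (the rewrite author's own statement) =====
-- stated objective: simpler
-- what changed: Replaces the heapq priority queue and the index-keyed dict of groups by a plain list of running sums scanned each step (g = sums.index(min(sums))) and a plain list of groups; tie-breaking is identical (first index achieving the minimal sum).
import Mathlib
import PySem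

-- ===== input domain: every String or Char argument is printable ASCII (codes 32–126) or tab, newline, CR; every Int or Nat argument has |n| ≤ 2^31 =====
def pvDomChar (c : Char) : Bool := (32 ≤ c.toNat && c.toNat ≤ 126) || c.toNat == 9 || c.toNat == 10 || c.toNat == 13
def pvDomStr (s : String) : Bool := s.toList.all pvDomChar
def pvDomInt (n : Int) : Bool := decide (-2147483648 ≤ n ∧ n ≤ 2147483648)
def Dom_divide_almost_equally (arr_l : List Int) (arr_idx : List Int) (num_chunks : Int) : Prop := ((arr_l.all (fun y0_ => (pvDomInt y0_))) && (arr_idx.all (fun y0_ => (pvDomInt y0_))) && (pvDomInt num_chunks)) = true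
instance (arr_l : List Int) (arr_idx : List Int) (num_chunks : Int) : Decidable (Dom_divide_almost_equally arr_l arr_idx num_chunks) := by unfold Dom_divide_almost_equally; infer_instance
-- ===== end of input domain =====

-- B drops heapq: a plain list of running sums with a repeated argmin scan and a plain
-- list of groups replace the priority queue and the index-keyed dict (simpler, not faster).

-- ===== PORT A =====
-- heapq is ported by its priority-queue contract: the heap holds (sum, index) pairs
-- compared lexicographically (Python tuple order; index pairs are distinct, so the
-- popped pair is uniquely determined); heappop removes the least pair, heappush
-- appends; heapify of the initial [(0,0),…,(0,k-1)] is the identity (already a heap).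
def pairLt (a b : Int × Int) : Bool := a.1 < b.1 || (a.1 == b.1 && a.2 < b.2)

def pmin (a b : Int × Int) : Int × Int := if pairLt b a then b else a

def heapMin : List (Int × Int) → Int × Int
  | [] => (0, 0)            -- heappop of an empty heap raises IndexError: outside Pre_
  | x :: xs => xs.foldl pmin x

def aStep (st : List (Int × Int) × PySem.Dict Int (List Int)) (p : Int × Int) :
    List (Int × Int) × PySem.Dict Int (List Int) :=
  let m := heapMin st.1                                   -- g_sum, g_idx = heappop(heap)
  let heap := st.1.erase m
  let groups := st.2.modify m.2 [] (fun l => l ++ [p.2])  -- groups[g_idx].append(…)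
  (heap ++ [(m.1 + p.1, m.2)], groups)                    -- heappush(heap, (g_sum, g_idx))

-- the loop 'for i in range(len(arr_l)): … sorted_arr[i] …' is the fold over
-- sorted_arr = zip(arr_l, arr_idx); exact under Pre_ (len(arr_l) ≤ len(arr_idx))
def divide_almost_equally (arr_l : List Int) (arr_idx : List Int) (num_chunks : Int) :
    List (List Int) :=
  let sorted_arr := arr_l.zip arr_idx
  let heap := (PySem.List.pyRange 0 num_chunks 1).map (fun i => ((0 : Int), i))
  let groups := (PySem.List.pyRange 0 num_chunks 1).foldl
      (fun d i => d.insert i ([] : List Int)) PySem.Dict.empty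
  ((sorted_arr.foldl aStep (heap, groups)).2).values

-- ===== PORT B =====
def bStep (st : List Int × List (List Int)) (p : Int × Int) :
    List Int × List (List Int) :=
  let sums := st.1
  let m := (PySem.List.min? sums (fun y => y)).getD 0   -- min(sums); ValueError on [] is outside Pre_
  let g : Int := ((PySem.List.index? sums m).getD 0 : Nat)   -- sums.index(m): first position of the minimum
  let groups := PySem.List.pySetD st.2 g (PySem.List.pyGetD st.2 g [] ++ [p.2])
  (PySem.List.pySetD sums g (PySem.List.pyGetD sums g 0 + p.1), groups)

def divide_almost_equally_alt (arr_l : List Int) (arr_idx : List Int) (num_chunks : Int) :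
    List (List Int) :=
  let sums := PySem.List.pyRepeat [(0 : Int)] num_chunks
  let groups := (PySem.List.pyRange 0 num_chunks 1).map (fun _ => ([] : List Int))
  ((arr_l.zip arr_idx).foldl bStep (sums, groups)).2

-- ===== PRECONDITION & SPEC =====
-- Pre_ excludes exactly the inputs on which A raises: with arr_l nonempty,
-- num_chunks ≤ 0 makes heappop fail (IndexError on an empty heap) and
-- len(arr_l) > len(arr_idx) makes sorted_arr[i] fail (IndexError).
def Pre_divide_almost_equally (arr_l : List Int) (arr_idx : List Int) (num_chunks : Int) : Prop :=
  arr_l = [] ∨ (0 < num_chunks ∧ arr_l.length ≤ arr_idx.length)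
instance (arr_l : List Int) (arr_idx : List Int) (num_chunks : Int) : Decidable (Pre_divide_almost_equally arr_l arr_idx num_chunks) := by unfold Pre_divide_almost_equally; infer_instance

def pvWitness_divide_almost_equally : List Int × List Int × Int := ([2, 1, 3], [7, 8, 9], 2)

def Spec_divide_almost_equally (arr_l : List Int) (arr_idx : List Int) (num_chunks : Int) (out : List (List Int)) : Prop := out = divide_almost_equally_alt arr_l arr_idx num_chunks
instance (arr_l : List Int) (arr_idx : List Int) (num_chunks : Int) (out : List (List Int)) : Decidable (Spec_divide_almost_equally arr_l arr_idx num_chunks out) := by unfold Spec_divide_almost_equally; infer_instance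

-- ===== CLAIM (what is proved, stated in full; the proofs are below) =====
def Claim_equal_divide_almost_equally : Prop := ∀ (arr_l : List Int) (arr_idx : List Int) (num_chunks : Int), Dom_divide_almost_equally arr_l arr_idx num_chunks → Pre_divide_almost_equally arr_l arr_idx num_chunks → Spec_divide_almost_equally arr_l arr_idx num_chunks (divide_almost_equally arr_l arr_idx num_chunks)

-- ===== LEMMAS AND PROOFS =====

theorem pairLt_eq (a b : Int × Int) : pairLt a b = decide (toLex a < toLex b) := by
  simp only [pairLt, Prod.Lex.lt_iff]
  by_cases h1 : a.1 < b.1 <;> by_cases h2 : a.1 = b.1 <;> by_cases h3 : a.2 < b.2 <;>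
    simp [h1, h2, h3]
theorem pmin_eq_min (a b : Int × Int) : pmin a b = ofLex (min (toLex a) (toLex b)) := by
  simp only [pmin, pairLt_eq, min_def, decide_eq_true_eq]
  rcases le_or_gt (toLex a) (toLex b) with h | h
  · rw [if_neg (by simpa using not_lt.mpr h), if_pos h]; rfl
  · rw [if_pos (by simpa using h), if_neg (not_le.mpr h)]; rfl
theorem pmin_comm (a b : Int × Int) : pmin a b = pmin b a := by
  rw [pmin_eq_min, pmin_eq_min, min_comm]
theorem toLex_ofLex' (x : Lex (Int × Int)) : toLex (ofLex x) = x := rfl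
theorem pmin_right_comm (a b c : Int × Int) : pmin (pmin a b) c = pmin (pmin a c) b := by
  simp only [pmin_eq_min, toLex_ofLex', min_right_comm]
def minOStep (acc : Option (Int × Int)) (x : Int × Int) : Option (Int × Int) :=
  match acc with
  | none => some x
  | some m => some (pmin m x)
def minO (l : List (Int × Int)) : Option (Int × Int) := l.foldl minOStep none
theorem foldl_minOStep_some (l : List (Int × Int)) (a : Int × Int) :
    l.foldl minOStep (some a) = some (l.foldl pmin a) := by
  induction l generalizing a with
  | nil => rfl
  | cons x xs ih => simp only [List.foldl_cons, minOStep, ih]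
theorem minO_cons (x : Int × Int) (xs : List (Int × Int)) :
    minO (x :: xs) = some (heapMin (x :: xs)) := by
  simp only [minO, List.foldl_cons, minOStep, heapMin, foldl_minOStep_some]
theorem minO_perm {l l' : List (Int × Int)} (h : l.Perm l') : minO l = minO l' := by
  exact List.Perm.foldl_eq (rcomm := ⟨by
    intro b a1 a2
    match b with
    | none => simp only [minOStep, pmin_comm a1 a2]
    | some m => simp only [minOStep, pmin_right_comm]⟩) h none
theorem heapMin_perm {x y : Int × Int} {xs ys : List (Int × Int)}
    (h : (x :: xs).Perm (y :: ys)) : heapMin (x :: xs) = heapMin (y :: ys) := by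
  have := minO_perm h
  rw [minO_cons, minO_cons] at this
  exact Option.some_injective _ this

def canon (s : List Int) : List (Int × Int) :=
  (List.range s.length).map (fun i => (s.getD i 0, (i : Int)))
theorem map_getD_range_self {β : Type} (l : List β) (d : β) :
    (List.range l.length).map (fun i => l.getD i d) = l := by
  apply List.ext_getElem
  · simp
  · intro i h1 h2
    simp [List.getD_eq_getElem?_getD, List.getElem?_eq_getElem h2]
theorem canon_length (s : List Int) : (canon s).length = s.length := by simp [canon]
theorem canon_getElem (s : List Int) (j : Nat) (hj : j < s.length) :
    (canon s)[j]'(by simpa [canon] using hj) = (s.getD j 0, (j : Int)) := by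
  simp [canon]
theorem canon_set (s : List Int) (j : Nat) (v : Int) (hj : j < s.length) :
    canon (s.set j v) = (canon s).set j (v, (j : Int)) := by
  apply List.ext_getElem
  · simp [canon]
  · intro i h1 h2
    have hi : i < s.length := by simpa [canon] using h2
    by_cases hij : i = j
    · subst hij
      simp [canon, List.getElem_set, List.getD_eq_getElem?_getD,
        List.getElem?_eq_getElem, hi]
    · simp [canon, List.getElem_set, hij, Ne.symm hij,
        List.getD_eq_getElem?_getD, List.getElem?_eq_getElem, hi]
theorem split_at (l : List (Int × Int)) (j : Nat) (hj : j < l.length) :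
    l = l.take j ++ l[j] :: l.drop (j + 1) := by
  conv_lhs => rw [← List.take_append_drop j l]
  rw [← List.getElem_cons_drop]
theorem heap_step_perm {heap l : List (Int × Int)} {j : Nat} {m : Int × Int}
    (hj : j < l.length) (hperm : heap.Perm l) (hm : l[j] = m) (p : Int × Int) :
    (heap.erase m ++ [p]).Perm (l.set j p) := by
  have hmeml : m ∈ l := hm ▸ List.getElem_mem hj
  have hmemh : m ∈ heap := hperm.mem_iff.mpr hmeml
  have e1 : l = l.take j ++ m :: l.drop (j + 1) := by rw [← hm]; exact split_at l j hj
  have hperm' : heap.Perm (l.take j ++ m :: l.drop (j + 1)) := e1 ▸ hperm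
  have h2 : heap.Perm (m :: (l.take j ++ l.drop (j + 1))) := hperm'.trans List.perm_middle
  have h3 : (heap.erase m).Perm (l.take j ++ l.drop (j + 1)) :=
    (((List.perm_cons_erase hmemh).symm.trans h2)).cons_inv
  have h4 : (heap.erase m ++ [p]).Perm ((l.take j ++ l.drop (j + 1)) ++ [p]) :=
    h3.append_right [p]
  have h5 : ((l.take j ++ l.drop (j + 1)) ++ [p]).Perm (l.take j ++ p :: l.drop (j + 1)) := by
    rw [List.append_assoc]
    exact List.Perm.append_left _ (List.perm_append_singleton _ _)
  rw [List.set_eq_take_cons_drop p hj]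
  exact h4.trans h5
theorem heapMin_perm' {l l' : List (Int × Int)} (h : l.Perm l') (hne : l' ≠ []) :
    heapMin l = heapMin l' := by
  cases l with
  | nil => exact absurd h.symm.eq_nil hne
  | cons x xs =>
    cases l' with
    | nil => exact absurd (List.Perm.eq_nil h) (by simp)
    | cons y ys => exact heapMin_perm h
theorem heapMin_append (l : List (Int × Int)) (hne : l ≠ []) (x : Int × Int) :
    heapMin (l ++ [x]) = pmin (heapMin l) x := by
  cases l with
  | nil => exact absurd rfl hne
  | cons y ys => simp [heapMin, List.foldl_append]
theorem canon_append (s : List Int) (v : Int) :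
    canon (s ++ [v]) = canon s ++ [(v, (s.length : Int))] := by
  simp only [canon, List.length_append, List.length_singleton, List.range_succ, List.map_append]
  congr 1
  · apply List.map_congr_left
    intro i hi
    have hin : i < s.length := List.mem_range.mp hi
    simp [List.getD_eq_getElem?_getD, List.getElem?_append_left hin]
  · simp [List.getD_eq_getElem?_getD, List.getElem?_append_right (Nat.le_refl _)]
theorem min?_append (s : List Int) (hne : s ≠ []) (v : Int) :
    PySem.List.min? (s ++ [v]) (fun y => y)
      = some (min ((PySem.List.min? s (fun y => y)).getD 0) v) := by
  cases s with
  | nil => exact absurd rfl hne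
  | cons y ys =>
    rw [List.cons_append, PySem.List.min?_id_cons, PySem.List.min?_id_cons]
    simp [List.foldl_append]
theorem getD_append_left {α : Type} {t u : List α} {j : Nat} (hj : j < t.length) (d : α) :
    (t ++ u).getD j d = t.getD j d := by
  rw [List.getD_eq_getElem?_getD, List.getElem?_append_left hj, ← List.getD_eq_getElem?_getD]
theorem getD_append_len {α : Type} (t : List α) (v d : α) :
    (t ++ [v]).getD t.length d = v := by
  rw [List.getD_eq_getElem?_getD, List.getElem?_append_right (Nat.le_refl _)]
  simp
theorem heapMin_canon (s : List Int) (hne : s ≠ []) :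
    ∃ j : Nat, j < s.length ∧
      PySem.List.index? s ((PySem.List.min? s (fun y => y)).getD 0) = some j ∧
      heapMin (canon s) = (s.getD j 0, (j : Int)) ∧
      s.getD j 0 = (PySem.List.min? s (fun y => y)).getD 0 := by
  induction s using List.reverseRecOn with
  | nil => exact absurd rfl hne
  | append_singleton t v ih =>
    rcases eq_or_ne t [] with ht | ht
    · subst ht
      refine ⟨0, by simp, ?_, ?_, ?_⟩
      · rw [PySem.List.index?_eq_idxOf?]
        simp [PySem.List.min?_id_cons]
      · simp [canon, heapMin]
      · simp [PySem.List.min?_id_cons]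
    · obtain ⟨j, hj, hidx, hheap, hval⟩ := ih ht
      have hcne : canon t ≠ [] := by
        apply List.ne_nil_of_length_pos
        simp only [canon, List.length_map, List.length_range]
        exact List.length_pos_iff.mpr ht
      set M := (PySem.List.min? t (fun y => y)).getD 0 with hM
      obtain ⟨m, hm⟩ := Option.ne_none_iff_exists'.mp
        (show PySem.List.min? t (fun y : Int => y) ≠ none from by
          rw [Ne, PySem.List.min?_eq_none_iff]; exact ht)
      have hmM : m = M := by rw [hM, hm, Option.getD_some]
      have hmin_le : ∀ y ∈ t, M ≤ y := by
        intro y hy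
        have := PySem.List.min?_isMin hm y hy
        simpa [hmM] using this
      have hMmem : M ∈ t := hmM ▸ PySem.List.min?_mem hm
      rw [min?_append t ht v, Option.getD_some, canon_append, heapMin_append _ hcne, hheap]
      rcases lt_or_ge v M with hvM | hMv
      · -- new minimum at the end
        have hvnot : v ∉ t := fun hmem => absurd (hmin_le v hmem) (by omega)
        have hc : pairLt (v, (t.length : Int)) (t.getD j 0, (j : Int)) = true := by
          simp only [pairLt, Bool.or_eq_true, decide_eq_true_eq]
          exact Or.inl (by rw [hval]; exact hvM)
        refine ⟨t.length, by simp, ?_, ?_, ?_⟩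
        · rw [min_eq_right (le_of_lt hvM), PySem.List.index?_append_singleton_self _ _ hvnot]
        · simp only [pmin, hc, if_true]
          rw [getD_append_len]
        · rw [min_eq_right (le_of_lt hvM), getD_append_len]
      · -- old minimum stays
        have hnot : pairLt (v, (t.length : Int)) (t.getD j 0, (j : Int)) = false := by
          simp only [pairLt, hval]
          have h1 : ¬ v < M := by omega
          by_cases h2 : v = M
          · have h3 : ¬ (t.length : Int) < (j : Int) := by
              exact_mod_cast Nat.not_lt.mpr (le_of_lt hj)
            simp [h1, h2, h3]
          · simp [h1, h2]
        refine ⟨j, by simp only [List.length_append]; omega, ?_, ?_, ?_⟩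
        · rw [min_eq_left hMv, PySem.List.index?_append_of_mem [v] hMmem]
          exact hidx
        · simp only [pmin, hnot, Bool.false_eq_true, if_false]
          rw [getD_append_left hj]
        · rw [min_eq_left hMv, getD_append_left hj]
          exact hval

theorem dict_keys {gA : PySem.Dict Int (List Int)} {n : Nat} {gB : List (List Int)}
    (hitems : gA.items = (List.range n).map (fun i : Nat => ((i : Int), gB.getD i ([] : List Int)))) :
    gA.keys = (List.range n).map (fun i : Nat => (i : Int)) := by
  simp only [PySem.Dict.keys, hitems, List.map_map]
  rfl
theorem dict_keys_nodup {gA : PySem.Dict Int (List Int)} {n : Nat} {gB : List (List Int)}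
    (hitems : gA.items = (List.range n).map (fun i : Nat => ((i : Int), gB.getD i ([] : List Int)))) :
    gA.keys.Nodup := by
  rw [dict_keys hitems]
  exact (List.nodup_range).map (fun a b h => by exact_mod_cast h)
theorem dict_step (n j : Nat) (t : Int) (gA : PySem.Dict Int (List Int)) (gB : List (List Int))
    (hj : j < n) (hlen : gB.length = n)
    (hitems : gA.items = (List.range n).map (fun i : Nat => ((i : Int), gB.getD i ([] : List Int)))) :
    (gA.modify ((j : Int)) [] (fun l => l ++ [t])).items
      = (List.range n).map (fun i : Nat => ((i : Int),
          (gB.set j (gB.getD j [] ++ [t])).getD i ([] : List Int))) := by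
  have hnodup := dict_keys_nodup hitems
  have hmemitems : ((j : Int), gB.getD j ([] : List Int)) ∈ gA.items := by
    rw [hitems]
    exact List.mem_map_of_mem (List.mem_range.mpr hj)
  have hcont : gA.contains (j : Int) = true := by
    rw [PySem.Dict.contains_iff_mem_keys, dict_keys hitems]
    exact List.mem_map_of_mem (List.mem_range.mpr hj)
  have hgd : gA.getD (j : Int) [] = gB.getD j [] :=
    PySem.Dict.getD_of_mem_items _ hmemitems hnodup []
  show (gA.insert (j : Int) ((gA.getD (j : Int) []) ++ [t])).items = _
  rw [PySem.Dict.items_insert_of_contains _ _ hcont, hgd, hitems, List.map_map]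
  apply List.map_congr_left
  intro i hi
  have hin : i < n := List.mem_range.mp hi
  by_cases hij : i = j
  · subst hij
    simp only [Function.comp_apply, beq_self_eq_true, if_pos]
    simp [List.getD_eq_getElem?_getD, List.getElem?_set_self, hlen, hin]
  · have hne : ((i : Int) == (j : Int)) = false := by
      simp only [beq_eq_false_iff_ne, ne_eq]
      exact_mod_cast hij
    simp only [Function.comp_apply, hne, Bool.false_eq_true, if_false]
    simp [List.getD_eq_getElem?_getD, List.getElem?_set_ne, hij, Ne.symm hij]
theorem main_sim (ps : List (Int × Int)) (k : Int) (hk : 0 < k)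
    (sums : List Int) (gB : List (List Int)) (heap : List (Int × Int))
    (gA : PySem.Dict Int (List Int))
    (hs : sums.length = k.toNat) (hg : gB.length = k.toNat)
    (hheap : heap.Perm (canon sums))
    (hitems : gA.items = (List.range k.toNat).map (fun i : Nat => ((i : Int), gB.getD i ([] : List Int)))) :
    (ps.foldl aStep (heap, gA)).2.values = (ps.foldl bStep (sums, gB)).2 := by
  induction ps generalizing sums gB heap gA with
  | nil =>
    simp only [List.foldl_nil]
    show gA.items.map (fun p => p.2) = gB
    rw [hitems, List.map_map]
    have h2 := map_getD_range_self gB ([] : List Int)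
    rw [hg] at h2
    exact h2
  | cons p ps ih =>
    simp only [List.foldl_cons]
    obtain ⟨j, hjl, hidx, hmin, hval⟩ := heapMin_canon sums
      (by apply List.ne_nil_of_length_pos; omega)
    have hjlt : j < k.toNat := by omega
    have hcne : canon sums ≠ [] := by
      apply List.ne_nil_of_length_pos
      simp only [canon, List.length_map, List.length_range, hs]
      omega
    have hheapMin : heapMin heap = (sums.getD j 0, (j : Int)) := by
      rw [heapMin_perm' hheap hcne, hmin]
    have hA : aStep (heap, gA) p
        = (heap.erase (sums.getD j 0, (j : Int)) ++ [(sums.getD j 0 + p.1, (j : Int))],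
           gA.modify (j : Int) [] (fun l => l ++ [p.2])) := by
      simp only [aStep, hheapMin]
    have hB : bStep (sums, gB) p
        = (sums.set j (sums.getD j 0 + p.1), gB.set j (gB.getD j [] ++ [p.2])) := by
      simp only [bStep, hidx, Option.getD_some, PySem.List.pySetD_natCast,
        PySem.List.pyGetD_natCast]
    rw [hA, hB]
    apply ih
    · simp [hs]
    · simp [hg]
    · rw [canon_set sums j _ (by omega)]
      exact heap_step_perm (by rw [canon_length]; omega) hheap
        (canon_getElem sums j (by omega)) _
    · exact dict_step k.toNat j p.2 gA gB hjlt hg hitems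
theorem init_items (k : Int) :
    ((PySem.List.pyRange 0 k 1).foldl (fun d i => d.insert i ([] : List Int)) PySem.Dict.empty).items
      = (PySem.List.pyRange 0 k 1).map (fun i => (i, ([] : List Int))) := by
  rw [PySem.Dict.items_foldl_insert_fresh (PySem.List.pyRange 0 k 1) (fun i => i)
    (fun _ => ([] : List Int)) PySem.Dict.empty
    (fun a _ => PySem.Dict.contains_empty a)
    (by simpa using PySem.List.nodup_pyRange_one 0 k)]
  rfl
theorem final_nil (arr_idx : List Int) (num_chunks : Int) :
    divide_almost_equally [] arr_idx num_chunks
      = divide_almost_equally_alt [] arr_idx num_chunks := by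
  simp only [divide_almost_equally, divide_almost_equally_alt, List.zip_nil_left, List.foldl_nil]
  show (_ : PySem.Dict Int (List Int)).items.map (fun p => p.2) = _
  rw [init_items, List.map_map]
  rfl
theorem final_main (arr_l arr_idx : List Int) (num_chunks : Int)
    (hk : 0 < num_chunks) (hlen : arr_l.length ≤ arr_idx.length) :
    divide_almost_equally arr_l arr_idx num_chunks
      = divide_almost_equally_alt arr_l arr_idx num_chunks := by
  simp only [divide_almost_equally, divide_almost_equally_alt]
  apply main_sim _ _ hk
  · rw [PySem.List.pyRepeat_singleton, List.length_replicate]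
  · rw [List.length_map, PySem.List.length_pyRange_one]
    omega
  · -- initial heap is exactly the canonical list
    have : (PySem.List.pyRange 0 num_chunks 1).map (fun i => ((0 : Int), i))
        = canon (PySem.List.pyRepeat [(0 : Int)] num_chunks) := by
      rw [PySem.List.pyRepeat_singleton, PySem.List.pyRange_one]
      simp only [canon, List.length_replicate, List.map_map, sub_zero]
      apply List.map_congr_left
      intro i hi
      have hin : i < num_chunks.toNat := List.mem_range.mp hi
      simp [List.getD_eq_getElem?_getD, List.getElem?_replicate, hin]
    rw [this]
  · rw [init_items, PySem.List.pyRange_one]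
    simp only [List.map_map, sub_zero]
    apply List.map_congr_left
    intro i hi
    have hin : i < num_chunks.toNat := List.mem_range.mp hi
    simp [List.getD_eq_getElem?_getD, List.getElem?_map, List.getElem?_range, hin]

-- ===== VERDICT (by name: the statement is the Claim_ definition above) =====
theorem divide_almost_equally_spec : Claim_equal_divide_almost_equally := by
  intro arr_l arr_idx num_chunks _ hpre
  unfold Spec_divide_almost_equally
  rcases hpre with hnil | ⟨hk, hlen⟩
  · subst hnil
    exact final_nil arr_idx num_chunks
  · exact final_main arr_l arr_idx num_chunks hk hlen
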